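-- pv_equiv track=rewrite | github.com/mohammadfaiizan/ProjectI | DSA/Problem/Queue_Stack/03_Monotonic_Stack/1124_Longest_Well_Performing_Interval.py | longestWPI_brute_force
-- ===== SOURCE A (Python) =====
-- from typing import List, Dict
--
-- def longestWPI_brute_force(hours: List[int]) -> int:
--     """
--     Approach 3: Brute Force
--
--     Check all possible subarrays.
--
--     Time: O(n²), Space: O(1)
--     """
--     n = len(hours)
--     max_length = 0
--
--     for i in range(n):
--         tiring_days = 0
--         non_tiring_days = 0
--
--         for j in range(i, n):
--             if hours[j] > 8:
--                 tiring_days += 1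
--             else:
--                 non_tiring_days += 1
--
--             if tiring_days > non_tiring_days:
--                 max_length = max(max_length, j - i + 1)
--
--     return max_length
-- ===== SOURCE B (Python) =====
-- from typing import List
--
-- def longestWPI_brute_force(hours: List[int]) -> int:
--     """
--     O(n) re-implementation: running prefix score (+1 tiring / -1 not) with a
--     hashmap of the first index at which each score value occurs.
--     """
--     score = 0
--     res = 0
--     first = {}
--     for i, h in enumerate(hours):
--         score += 1 if h > 8 else -1
--         if score > 0:
--             res = i + 1
--         elif score - 1 in first:
--             res = max(res, i - first[score - 1])
--         if score not in first:
--             first[score] = i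
--     return res
-- ===== Notes on version B (the rewrite author's own statement) =====
-- stated objective: faster
-- what changed: Replaced the O(n^2) all-subarrays scan with two running counters by a single pass keeping a running prefix score and a hashmap of the first index where each score value occurs.
import Mathlib
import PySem

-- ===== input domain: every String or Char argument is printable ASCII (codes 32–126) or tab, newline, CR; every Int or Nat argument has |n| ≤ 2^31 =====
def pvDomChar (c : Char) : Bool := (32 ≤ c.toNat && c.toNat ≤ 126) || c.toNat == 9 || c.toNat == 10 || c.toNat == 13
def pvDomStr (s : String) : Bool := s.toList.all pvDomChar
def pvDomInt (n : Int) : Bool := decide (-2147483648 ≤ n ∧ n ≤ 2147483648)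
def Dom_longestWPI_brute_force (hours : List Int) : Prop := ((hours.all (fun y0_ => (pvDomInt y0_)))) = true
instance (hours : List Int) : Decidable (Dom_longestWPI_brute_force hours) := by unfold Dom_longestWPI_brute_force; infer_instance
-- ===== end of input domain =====

-- B replaces A's O(n^2) scan over all subarrays by one pass: a running prefix score
-- and a hashmap of the first index at which each score value occurs.

-- ===== PORT A =====
-- one inner-loop step of A: update the tiring/non-tiring counters and the running max
def pvStepA (hours : List Int) (i : Int) (st : Int × Int × Int) (j : Int) : Int × Int × Int :=
  let h := PySem.List.pyGetD hours j 0   -- hours[j]; j is always in range here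
  let t := if h > 8 then st.1 + 1 else st.1
  let nt := if h > 8 then st.2.1 else st.2.1 + 1
  let m := if t > nt then max st.2.2 (j - i + 1) else st.2.2
  (t, nt, m)

def longestWPI_brute_force (hours : List Int) : Int :=
  let n : Int := PySem.List.len hours
  (PySem.List.pyRange 0 n 1).foldl
    (fun maxLength i => ((PySem.List.pyRange i n 1).foldl (pvStepA hours i) (0, 0, maxLength)).2.2)
    0

-- ===== PORT B =====
-- one step of B: update the prefix score, the answer, and the first-occurrence map
def pvStepB (st : Int × Int × PySem.Dict Int Int) (p : Int × Int) : Int × Int × PySem.Dict Int Int :=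
  let score := st.1 + (if p.2 > 8 then 1 else -1)
  let res :=
    if score > 0 then p.1 + 1
    else match (st.2.2).get? (score - 1) with
      | some f => max st.2.1 (p.1 - f)
      | none => st.2.1
  let first := if (st.2.2).contains score then st.2.2 else (st.2.2).insert score p.1
  (score, res, first)

def longestWPI_brute_force_alt (hours : List Int) : Int :=
  ((PySem.List.enumerate hours 0).foldl pvStepB (0, 0, PySem.Dict.empty)).2.1

-- ===== PRECONDITION & SPEC =====
def Spec_longestWPI_brute_force (hours : List Int) (out : Int) : Prop := out = longestWPI_brute_force_alt hours
instance (hours : List Int) (out : Int) : Decidable (Spec_longestWPI_brute_force hours out) := by unfold Spec_longestWPI_brute_force; infer_instance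

-- ===== CLAIM (what is proved, stated in full; the proofs are below) =====
def Claim_equal_longestWPI_brute_force : Prop := ∀ (hours : List Int), Dom_longestWPI_brute_force hours → Spec_longestWPI_brute_force hours (longestWPI_brute_force hours)

-- ===== LEMMAS AND PROOFS =====

def pvSc (x : Int) : Int := if x > 8 then 1 else -1
def pvP (hours : List Int) (k : ℕ) : Int := ((hours.take k).map pvSc).sum
def pvG (hours : List Int) (i j : ℕ) : ℕ := if pvP hours i < pvP hours (j+1) then j + 1 - i else 0
lemma pvP_zero (hours : List Int) : pvP hours 0 = 0 := rfl
lemma pvP_succ (hours : List Int) (k : ℕ) (hk : k < hours.length) :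
    pvP hours (k+1) = pvP hours k + pvSc hours[k] := by
  have h : hours.take (k+1) = hours.take k ++ [hours[k]] := by
    rw [List.take_add_one, List.getElem?_eq_getElem hk]; rfl
  unfold pvP
  rw [h, List.map_append, List.sum_append]
  simp

lemma pvSum_sc (l : List Int) :
    (l.map pvSc).sum = 2 * (l.countP (fun x => decide (x > 8)) : Int) - l.length := by
  induction l with
  | nil => simp
  | cons a t ih =>
    by_cases h : a > 8 <;> simp [pvSc, h, ih] <;> omega
lemma pvP_window (hours : List Int) (i c : ℕ) (hic : i ≤ c) :
    pvP hours c - pvP hours i = (((hours.drop i).take (c - i)).map pvSc).sum := by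
  have h : hours.take c = hours.take i ++ (hours.drop i).take (c - i) := by
    rw [← List.take_add]; congr 1; omega
  simp [pvP, h]

-- discrete intermediate value: a unit-step path from above v to (at or below) v hits v
lemma pvCross (hours : List Int) (v : Int) (a b : ℕ) (hab : a ≤ b) (hb : b ≤ hours.length)
    (ha : v < pvP hours a) (hbv : pvP hours b ≤ v) :
    ∃ t, a < t ∧ t ≤ b ∧ pvP hours t = v := by
  induction b with
  | zero =>
    interval_cases a
    omega
  | succ b ih =>
    by_cases hba : pvP hours b ≤ v
    · have hab' : a ≤ b := by
        rcases Nat.lt_or_ge a (b+1) with h | h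
        · rcases Nat.lt_succ_iff.mp h with h'
          exact h'
        · exfalso; have : a = b + 1 := by omega
          subst this; omega
      obtain ⟨t, h1, h2, h3⟩ := ih hab' (by omega) hba
      exact ⟨t, h1, by omega, h3⟩
    · rw [not_le] at hba
      have hstep := pvP_succ hours b (by omega)
      have hsc : pvSc hours[b] = 1 ∨ pvSc hours[b] = -1 := by
        unfold pvSc; split <;> simp
      have hv : pvP hours (b+1) = v := by omega
      have hab2 : a ≤ b := by
        by_contra h
        have : a = b + 1 := by omega
        subst this; omega
      exact ⟨b+1, by omega, le_refl _, hv⟩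


lemma pvInnerA (hours : List Int) (i : ℕ) (m0 : Int) (hm0 : 0 ≤ m0)
    (c : ℕ) (hic : i ≤ c) (hcn : c ≤ hours.length) :
    (PySem.List.pyRange (i : Int) (c : Int) 1).foldl (pvStepA hours (i : Int)) (0, 0, m0)
      = ((((hours.drop i).take (c - i)).countP (fun x => decide (x > 8)) : Int),
         ((c - i : ℕ) : Int) - (((hours.drop i).take (c - i)).countP (fun x => decide (x > 8)) : Int),
         max m0 (((Finset.Ico i c).sup (pvG hours i) : ℕ) : Int)) := by
  induction c, hic using Nat.le_induction with
  | base =>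
    rw [PySem.List.pyRange_one_eq_nil (le_refl _)]
    simp [max_eq_left hm0]
  | succ c hic ih =>
    have hclen : c < hours.length := by omega
    specialize ih (by omega)
    have hcast : ((c + 1 : ℕ) : Int) = (c : Int) + 1 := by push_cast; ring
    rw [hcast, PySem.List.pyRange_one_succ_right (by exact_mod_cast hic), List.foldl_append, ih]
    have hget : PySem.List.pyGetD hours (c : Int) 0 = hours[c] := by
      simp [PySem.List.pyGetD_natCast]
      exact List.getD_eq_getElem hours 0 hclen
    have hwin : (hours.drop i).take (c + 1 - i) = (hours.drop i).take (c - i) ++ [hours[c]] := by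
      rw [show c + 1 - i = (c - i) + 1 by omega, List.take_add_one]
      congr 1
      rw [List.getElem?_drop, show i + (c - i) = c by omega, List.getElem?_eq_getElem hclen]
      rfl
    set T : Int := (((hours.drop i).take (c - i)).countP (fun x => decide (x > 8)) : Int) with hT
    set S : ℕ := (Finset.Ico i c).sup (pvG hours i) with hS
    have hPP : pvP hours (c+1) - pvP hours i
        = 2 * ((((hours.drop i).take (c + 1 - i)).countP (fun x => decide (x > 8)) : Int))
          - ((c + 1 - i : ℕ) : Int) := by
      rw [pvP_window hours i (c+1) (by omega), pvSum_sc]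
      congr 2
      simp [List.length_take, List.length_drop]
      omega
    have hIco : Finset.Ico i (c+1) = insert c (Finset.Ico i c) := by
      ext x; simp [Finset.mem_Ico]; omega
    have hsup : (Finset.Ico i (c+1)).sup (pvG hours i) = max (pvG hours i c) S := by
      rw [hIco, Finset.sup_insert]
    have hcnt : (((hours.drop i).take (c + 1 - i)).countP (fun x => decide (x > 8)) : Int)
        = T + (if hours[c] > 8 then 1 else 0) := by
      rw [hwin, List.countP_append]; by_cases hh : hours[c] > 8 <;> simp [hh, hT]
    rw [hcnt] at hPP
    have e1 : pvStepA hours (i:Int) (T, ((c-i:ℕ):Int) - T, max m0 (S:Int)) (c:Int)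
        = (if hours[c] > 8 then T + 1 else T,
           if hours[c] > 8 then ((c-i:ℕ):Int) - T else (((c-i:ℕ):Int) - T) + 1,
           if (if hours[c] > 8 then T + 1 else T) > (if hours[c] > 8 then ((c-i:ℕ):Int) - T else (((c-i:ℕ):Int) - T) + 1)
           then max (max m0 (S:Int)) ((c:Int) - (i:Int) + 1) else max m0 (S:Int)) := by
      simp only [pvStepA, hget]
    rw [List.foldl_cons, List.foldl_nil, e1, hcnt]
    have hLen : (c:Int) - (i:Int) + 1 = ((c+1-i : ℕ) : Int) := by
      rw [Nat.cast_sub (by omega)]; push_cast; ring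
    have hg : pvG hours i c = if pvP hours i < pvP hours (c+1) then c + 1 - i else 0 := rfl
    by_cases hh : hours[c] > 8 <;> by_cases hcnd : pvP hours i < pvP hours (c+1) <;>
        simp only [hh, if_true, if_false] at hPP ⊢ <;>
        rw [hsup, show pvG hours i c = if pvP hours i < pvP hours (c+1) then c + 1 - i else 0 from rfl] <;>
        simp only [hcnd, if_true, if_false]
    · rw [if_pos (show ((c-i:ℕ):Int) - T < T + 1 by omega)]
      refine Prod.ext rfl (Prod.ext (by simp; omega) ?_)
      simp only [hLen, Nat.cast_max]
      rw [max_assoc, max_comm ((S:ℕ):Int)]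
    · rw [if_neg (show ¬ (((c-i:ℕ):Int) - T < T + 1) by omega)]
      refine Prod.ext rfl (Prod.ext (by simp; omega) ?_)
      simp
    · rw [if_pos (show ((c-i:ℕ):Int) - T + 1 < T by omega)]
      refine Prod.ext rfl (Prod.ext (by simp; omega) ?_)
      simp only [hLen, Nat.cast_max]
      rw [max_assoc, max_comm ((S:ℕ):Int)]
    · rw [if_neg (show ¬ (((c-i:ℕ):Int) - T + 1 < T) by omega)]
      refine Prod.ext rfl (Prod.ext (by simp; omega) ?_)
      simp

def pvBestStart (hours : List Int) (i : ℕ) : ℕ := (Finset.Ico i hours.length).sup (pvG hours i)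

lemma pvOuterA (hours : List Int) (u : ℕ) (hu : u ≤ hours.length) :
    (PySem.List.pyRange 0 (u : Int) 1).foldl
      (fun maxLength i => ((PySem.List.pyRange i ((hours.length : ℕ) : Int) 1).foldl (pvStepA hours i) (0, 0, maxLength)).2.2) 0
    = (((Finset.range u).sup (pvBestStart hours) : ℕ) : Int) := by
  induction u with
  | zero => simp [PySem.List.pyRange_one_eq_nil]
  | succ u ih =>
    specialize ih (by omega)
    have hcast : ((u + 1 : ℕ) : Int) = (u : Int) + 1 := by push_cast; ring
    rw [hcast, PySem.List.pyRange_one_succ_right (by positivity), List.foldl_append, ih,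
        List.foldl_cons, List.foldl_nil]
    rw [pvInnerA hours u _ (by positivity) hours.length (by omega) le_rfl]
    rw [Finset.range_add_one, Finset.sup_insert, show (Finset.Ico u hours.length).sup (pvG hours u) = pvBestStart hours u from rfl,
       Nat.cast_max, max_comm ((pvBestStart hours u : ℕ) : Int)]

lemma pvA_eq (hours : List Int) :
    longestWPI_brute_force hours = (((Finset.range hours.length).sup (pvBestStart hours) : ℕ) : Int) := by
  show (PySem.List.pyRange 0 (PySem.List.len hours) 1).foldl _ 0 = _
  rw [show PySem.List.len hours = ((hours.length : ℕ) : Int) from PySem.List.len_eq hours]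
  exact pvOuterA hours hours.length le_rfl

def pvBestEnd (hours : List Int) (j : ℕ) : ℕ :=
  (Finset.range j).sup (fun i => if pvP hours i < pvP hours j then j - i else 0)

def pvBig (hours : List Int) (k : ℕ) : ℕ := (Finset.range (k+1)).sup (pvBestEnd hours)

lemma pvBridge (hours : List Int) :
    (Finset.range hours.length).sup (pvBestStart hours) = pvBig hours hours.length := by
  apply le_antisymm
  · apply Finset.sup_le
    intro i hi
    rw [Finset.mem_range] at hi
    apply Finset.sup_le
    intro j hj
    rw [Finset.mem_Ico] at hj
    unfold pvG
    split
    · rename_i hlt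
      calc j + 1 - i ≤ pvBestEnd hours (j+1) := by
            apply Finset.le_sup_of_le (b := i) (by rw [Finset.mem_range]; omega)
            rw [if_pos hlt]
        _ ≤ pvBig hours hours.length := by
            apply Finset.le_sup
            rw [Finset.mem_range]; omega
    · exact Nat.zero_le _
  · apply Finset.sup_le
    intro j hj
    rw [Finset.mem_range] at hj
    apply Finset.sup_le
    intro i hi
    rw [Finset.mem_range] at hi
    split
    · rename_i hlt
      have hj1 : j = (j - 1) + 1 := by omega
      apply Finset.le_sup_of_le (b := i) (by rw [Finset.mem_range]; omega)
      unfold pvBestStart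
      apply Finset.le_sup_of_le (b := j - 1) (by rw [Finset.mem_Ico]; omega)
      unfold pvG
      rw [← hj1, if_pos hlt]
    · exact Nat.zero_le _

def pvF (hours : List Int) (k : ℕ) (v : Int) : Option ℕ :=
  (List.range k).find? (fun i => decide (pvP hours (i+1) = v))

lemma pvF_none (hours : List Int) (k : ℕ) (v : Int) (h : pvF hours k v = none) :
    ∀ i, i < k → pvP hours (i+1) ≠ v := by
  intro i hi
  have := List.find?_eq_none.mp h i (by simpa using hi)
  simpa using this

lemma pvF_some (hours : List Int) (k : ℕ) (v : Int) (f : ℕ) (h : pvF hours k v = some f) :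
    f < k ∧ pvP hours (f+1) = v ∧ ∀ i, i < f → pvP hours (i+1) ≠ v := by
  unfold pvF at h
  rw [List.find?_eq_some_iff_getElem] at h
  obtain ⟨hp, j, hj, hget, hmin⟩ := h
  simp at hp
  rw [List.getElem_range] at hget
  subst hget
  refine ⟨by simpa using hj, hp, ?_⟩
  intro i hi
  have := hmin i hi
  rw [List.getElem_range] at this
  simpa using this

lemma pvF_succ (hours : List Int) (k : ℕ) (v : Int) :
    pvF hours (k+1) v = (pvF hours k v).or (if pvP hours (k+1) = v then some k else none) := by
  unfold pvF
  rw [List.range_succ, List.find?_append]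
  congr 1
  by_cases h : pvP hours (k+1) = v <;> simp [h]

lemma pvBestEnd_le (hours : List Int) (j : ℕ) : pvBestEnd hours j ≤ j := by
  apply Finset.sup_le
  intro i _
  split <;> omega

lemma pvBig_le (hours : List Int) (k : ℕ) : pvBig hours k ≤ k := by
  apply Finset.sup_le
  intro j hj
  rw [Finset.mem_range] at hj
  exact le_trans (pvBestEnd_le hours j) (by omega)

lemma pvBig_succ (hours : List Int) (k : ℕ) :
    pvBig hours (k+1) = max (pvBig hours k) (pvBestEnd hours (k+1)) := by
  unfold pvBig
  rw [Finset.range_add_one, Finset.sup_insert]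
  exact max_comm _ _

lemma pvBestEnd_pos (hours : List Int) (k : ℕ) (h : 0 < pvP hours (k+1)) :
    pvBestEnd hours (k+1) = k + 1 := by
  apply le_antisymm (pvBestEnd_le hours (k+1))
  apply Finset.le_sup_of_le (b := 0) (by simp)
  rw [if_pos (by rw [pvP_zero]; exact h)]
  omega

lemma pvBestEnd_some (hours : List Int) (k f : ℕ) (hk : k < hours.length)
    (hnp : ¬ 0 < pvP hours (k+1)) (hf : pvF hours k (pvP hours (k+1) - 1) = some f) :
    pvBestEnd hours (k+1) = k - f := by
  obtain ⟨hfk, hfv, hmin⟩ := pvF_some hours k _ f hf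
  apply le_antisymm
  · apply Finset.sup_le
    intro i hi
    rw [Finset.mem_range] at hi
    split
    · rename_i hlt
      rcases Nat.eq_zero_or_pos i with h0 | h1
      · subst h0; rw [pvP_zero] at hlt; omega
      · -- i ≥ 1 and pvP i ≤ pvP (k+1) - 1; find t ≤ i with pvP t = pvP (k+1) - 1
        have hile : pvP hours i ≤ pvP hours (k+1) - 1 := by omega
        have : ∃ t, 0 < t ∧ t ≤ i ∧ pvP hours t = pvP hours (k+1) - 1 := by
          rcases eq_or_lt_of_le hile with he | hl
          · exact ⟨i, h1, le_refl _, he⟩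
          · exact pvCross hours (pvP hours (k+1) - 1) 0 i (by omega) (by omega)
              (by rw [pvP_zero]; omega) (by omega)
        obtain ⟨t, ht0, hti, htv⟩ := this
        have : ¬ t - 1 < f := fun hc => hmin (t-1) hc (by rw [show t - 1 + 1 = t by omega]; exact htv)
        omega
    · omega
  · apply Finset.le_sup_of_le (b := f + 1) (by rw [Finset.mem_range]; omega)
    rw [if_pos (by rw [hfv]; omega)]
    omega

lemma pvBestEnd_none (hours : List Int) (k : ℕ) (hk : k < hours.length)
    (hnp : ¬ 0 < pvP hours (k+1)) (hf : pvF hours k (pvP hours (k+1) - 1) = none) :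
    pvBestEnd hours (k+1) = 0 := by
  have hmin := pvF_none hours k _ hf
  apply Nat.le_zero.mp
  apply Finset.sup_le
  intro i hi
  rw [Finset.mem_range] at hi
  split
  · rename_i hlt
    exfalso
    rcases Nat.eq_zero_or_pos i with h0 | h1
    · subst h0; rw [pvP_zero] at hlt; omega
    · have hile : pvP hours i ≤ pvP hours (k+1) - 1 := by omega
      have : ∃ t, 0 < t ∧ t ≤ i ∧ pvP hours t = pvP hours (k+1) - 1 := by
        rcases eq_or_lt_of_le hile with he | hl
        · exact ⟨i, h1, le_refl _, he⟩
        · exact pvCross hours (pvP hours (k+1) - 1) 0 i (by omega) (by omega)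
            (by rw [pvP_zero]; omega) (by omega)
      obtain ⟨t, ht0, hti, htv⟩ := this
      exact hmin (t-1) (by omega) (by rw [show t - 1 + 1 = t by omega]; exact htv)
  · rfl

lemma pvInvB (hours : List Int) (k : ℕ) (hk : k ≤ hours.length) :
    ((PySem.List.enumerate (hours.take k) 0).foldl pvStepB (0, 0, PySem.Dict.empty)).1 = pvP hours k
  ∧ ((PySem.List.enumerate (hours.take k) 0).foldl pvStepB (0, 0, PySem.Dict.empty)).2.1 = ((pvBig hours k : ℕ) : Int)
  ∧ ∀ v, ((PySem.List.enumerate (hours.take k) 0).foldl pvStepB (0, 0, PySem.Dict.empty)).2.2.get? v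
      = (pvF hours k v).map (fun i => (i : Int)) := by
  induction k with
  | zero =>
    refine ⟨rfl, by simp [pvBig, pvBestEnd], ?_⟩
    intro v
    simp [pvF, PySem.Dict.get?_empty, PySem.List.enumerate_nil]
  | succ k ih =>
    have hk' : k < hours.length := by omega
    obtain ⟨ihs, ihr, ihd⟩ := ih (by omega)
    set st := ((PySem.List.enumerate (hours.take k) 0).foldl pvStepB
      ((0 : Int), (0 : Int), (PySem.Dict.empty : PySem.Dict Int Int))) with hst
    have htake : hours.take (k+1) = hours.take k ++ [hours[k]] := by
      rw [List.take_add_one, List.getElem?_eq_getElem hk']; rfl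
    have hlen : (hours.take k).length = k := by
      rw [List.length_take]; omega
    have henum : PySem.List.enumerate (hours.take (k+1)) 0
        = PySem.List.enumerate (hours.take k) 0 ++ [((k : Int), hours[k])] := by
      rw [htake, PySem.List.enumerate_append, hlen]
      simp [PySem.List.enumerate_cons, PySem.List.enumerate_nil]
    rw [henum, List.foldl_append, List.foldl_cons, List.foldl_nil, ← hst]
    have hscore : st.1 + (if hours[k] > 8 then (1:Int) else -1) = pvP hours (k+1) := by
      rw [ihs, pvP_succ hours k hk']
      simp [pvSc]
    refine ⟨?_, ?_, ?_⟩
    · show st.1 + (if hours[k] > 8 then (1:Int) else -1) = pvP hours (k+1)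
      exact hscore
    · show (if st.1 + (if hours[k] > 8 then (1:Int) else -1) > 0
            then (k : Int) + 1
            else match (st.2.2).get? (st.1 + (if hours[k] > 8 then (1:Int) else -1) - 1) with
              | some f => max st.2.1 ((k : Int) - f)
              | none => st.2.1) = ((pvBig hours (k+1) : ℕ) : Int)
      rw [hscore]
      by_cases hpos : pvP hours (k+1) > 0
      · rw [if_pos hpos, pvBig_succ, pvBestEnd_pos hours k hpos,
           Nat.max_eq_right (by have := pvBig_le hours k; omega)]
        push_cast; ring
      · rw [if_neg hpos, ihd]
        rcases hF : pvF hours k (pvP hours (k+1) - 1) with _ | f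
        · show st.2.1 = ((pvBig hours (k+1) : ℕ) : Int)
          rw [ihr, pvBig_succ, pvBestEnd_none hours k hk' hpos hF, Nat.max_eq_left (Nat.zero_le _)]
        · show max st.2.1 ((k : Int) - ((f : ℕ) : Int)) = ((pvBig hours (k+1) : ℕ) : Int)
          obtain ⟨hfk, _, _⟩ := pvF_some hours k _ f hF
          rw [ihr, pvBig_succ, pvBestEnd_some hours k f hk' hpos hF, Nat.cast_max,
             Nat.cast_sub (by omega)]
    · intro v
      show (if (st.2.2).contains (st.1 + (if hours[k] > 8 then (1:Int) else -1))
            then st.2.2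
            else (st.2.2).insert (st.1 + (if hours[k] > 8 then (1:Int) else -1)) (k : Int)).get? v
          = (pvF hours (k+1) v).map (fun i => (i : Int))
      rw [hscore, PySem.Dict.contains_eq_isSome_get?, ihd, pvF_succ]
      rcases hF' : pvF hours k (pvP hours (k+1)) with _ | g
      · rw [if_neg (by simp), PySem.Dict.get?_insert, ihd]
        by_cases hv : v = pvP hours (k+1)
        · subst hv
          rw [if_pos rfl, hF']
          simp
        · rw [if_neg hv]
          simp [Ne.symm hv]
      · rw [if_pos (by simp), ihd]
        by_cases hv : v = pvP hours (k+1)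
        · subst hv
          rw [hF']
          simp
        · simp [Ne.symm hv]

lemma pvB_eq (hours : List Int) :
    longestWPI_brute_force_alt hours = ((pvBig hours hours.length : ℕ) : Int) := by
  have h := (pvInvB hours hours.length le_rfl).2.1
  rw [List.take_length] at h
  exact h

-- ===== VERDICT (by name: the statement is the Claim_ definition above) =====
theorem longestWPI_brute_force_spec : Claim_equal_longestWPI_brute_force := by
  intro hours _
  unfold Spec_longestWPI_brute_force
  rw [pvA_eq, pvB_eq, pvBridge]
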